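-- pv_equiv track=rewrite | github.com/paoladiazzh/Analizador-L-xico-y-Sint-ctico-Simplificado | AnalizadorLexico_SintaticoSimplificado.py | analizador_lexico
-- ===== SOURCE A (Python) =====
-- def afd_id(cadena):
--     estado = 0
--     i = 0
--     while i < len(cadena):
--         c = cadena[i]
--         if estado == 0:
--             if c.isalpha():
--                 estado = 1
--             else:
--                 break
--         elif estado == 1:
--             if c.isalnum():
--                 estado = 1
--             else:
--                 break
--         i += 1
--     if estado == 1:
--         return i  # longitud del token válido
--     return 0
--
-- def afd_num(cadena):
--     estado = 0
--     i = 0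
--     while i < len(cadena):
--         c = cadena[i]
--         if estado == 0:
--             if c in "+-":
--                 estado = 1
--             elif c.isdigit():
--                 estado = 2
--             else:
--                 break
--         elif estado == 1:
--             if c.isdigit():
--                 estado = 2
--             else:
--                 break
--         elif estado == 2:
--             if c.isdigit():
--                 estado = 2
--             else:
--                 break
--         i += 1
--     if estado == 2:
--         return i  # longitud del token válido
--     return 0
--
-- def afd_op_par(cadena):
--     if cadena and cadena[0] in "+-*/=()":
--         return 1
--     return 0
--
-- def analizador_lexico(cadena):
--     tokens = []
--     i = 0
--     while i < len(cadena):
--         c = cadena[i]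
--
--         # Ignorar espacios en blanco
--         if c.isspace():
--             i += 1
--             continue
--
--         # Intentar id
--         longitud = afd_id(cadena[i:])
--         if longitud > 0:
--             tokens.append(("id", cadena[i:i+longitud]))
--             i += longitud
--             continue
--
--         # Intentar num
--         longitud = afd_num(cadena[i:])
--         if longitud > 0:
--             tokens.append(("num", cadena[i:i+longitud]))
--             i += longitud
--             continue
--
--         # Intentar operador o paréntesis
--         longitud = afd_op_par(cadena[i:])
--         if longitud > 0:
--             tokens.append((cadena[i], cadena[i]))
--             i += longitud
--             continue
--
--         # Si no entró en ningún AFD da error léxico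
--         raise ValueError(f"Error léxico: carácter no válido '{c}' en la posición {i}")
--
--     return tokens
-- ===== SOURCE B (Python) =====
-- def analizador_lexico(cadena):
--     tokens = []
--     i = 0
--     n = len(cadena)
--     while i < n:
--         c = cadena[i]
--         if c.isspace():
--             i += 1
--         elif c.isalpha():
--             j = i + 1
--             while j < n and cadena[j].isalnum():
--                 j += 1
--             tokens.append(("id", cadena[i:j]))
--             i = j
--         elif c.isdigit() or ((c in "+-") and i + 1 < n and cadena[i + 1].isdigit()):
--             j = i + 1
--             while j < n and cadena[j].isdigit():
--                 j += 1
--             tokens.append(("num", cadena[i:j]))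
--             i = j
--         elif c in "+-*/=()":
--             tokens.append((c, c))
--             i += 1
--         else:
--             raise ValueError(f"Error léxico: carácter no válido '{c}' en la posición {i}")
--     return tokens
-- ===== Notes on version B (the rewrite author's own statement) =====
-- stated objective: simpler
-- what changed: Replaced the three sequential DFA trials (restarting a fresh state machine on the remaining string for id, then num, then operator) with a single scanner that dispatches once on the class of the current character and consumes each token directly with one takeWhile-style scan.
import Mathlib
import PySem

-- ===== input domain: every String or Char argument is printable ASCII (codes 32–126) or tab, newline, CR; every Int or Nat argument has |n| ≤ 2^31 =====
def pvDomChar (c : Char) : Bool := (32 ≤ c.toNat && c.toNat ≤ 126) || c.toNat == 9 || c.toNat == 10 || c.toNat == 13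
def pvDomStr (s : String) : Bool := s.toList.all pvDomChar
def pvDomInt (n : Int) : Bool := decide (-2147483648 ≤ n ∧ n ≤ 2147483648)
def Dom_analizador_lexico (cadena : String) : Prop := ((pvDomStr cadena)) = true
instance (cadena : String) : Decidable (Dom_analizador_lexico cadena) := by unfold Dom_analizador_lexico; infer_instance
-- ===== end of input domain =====

-- B replaces A's three sequential DFA trials with a single scanner dispatching on the
-- first character's class (objective: simpler, one pass per token instead of up to three).

-- ===== PORT A =====
-- afd_id's while loop: state (estado, i) over the remaining characters
def afdIdGo : Nat → Nat → List Char → Nat × Nat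
  | estado, i, [] => (estado, i)
  | estado, i, c :: rest =>
    if estado = 0 then
      if PySem.Chars.isalpha c then afdIdGo 1 (i + 1) rest else (estado, i)
    else
      if PySem.Chars.isalnum c then afdIdGo 1 (i + 1) rest else (estado, i)

def afd_id (cadena : List Char) : Nat :=
  let r := afdIdGo 0 0 cadena
  if r.1 = 1 then r.2 else 0

-- afd_num's while loop
def afdNumGo : Nat → Nat → List Char → Nat × Nat
  | estado, i, [] => (estado, i)
  | estado, i, c :: rest =>
    if estado = 0 then
      if c = '+' ∨ c = '-' then afdNumGo 1 (i + 1) rest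
      else if PySem.Chars.isdigit c then afdNumGo 2 (i + 1) rest
      else (estado, i)
    else if estado = 1 then
      if PySem.Chars.isdigit c then afdNumGo 2 (i + 1) rest else (estado, i)
    else
      if PySem.Chars.isdigit c then afdNumGo 2 (i + 1) rest else (estado, i)

def afd_num (cadena : List Char) : Nat :=
  let r := afdNumGo 0 0 cadena
  if r.1 = 2 then r.2 else 0

def afd_op_par (cadena : List Char) : Nat :=
  match cadena with
  | c :: _ => if c ∈ ['+', '-', '*', '/', '=', '(', ')'] then 1 else 0
  | [] => 0

-- A's main while loop; cs is cadena[i:]; on the ValueError branch the port returns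
-- the tokens so far (those inputs are excluded by Pre_).
def anaGoA (cs : List Char) (tokens : List (String × String)) : List (String × String) :=
  match cs with
  | [] => tokens
  | c :: rest =>
    if PySem.Chars.isspace c then anaGoA rest tokens
    else if h1 : 0 < afd_id (c :: rest) then
      anaGoA ((c :: rest).drop (afd_id (c :: rest)))
        (tokens ++ [("id", String.ofList ((c :: rest).take (afd_id (c :: rest))))])
    else if h2 : 0 < afd_num (c :: rest) then
      anaGoA ((c :: rest).drop (afd_num (c :: rest)))
        (tokens ++ [("num", String.ofList ((c :: rest).take (afd_num (c :: rest))))])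
    else if h3 : 0 < afd_op_par (c :: rest) then
      anaGoA ((c :: rest).drop (afd_op_par (c :: rest)))
        (tokens ++ [(String.ofList [c], String.ofList [c])])
    else tokens
  termination_by cs.length
  decreasing_by
  · simp
  · first | omega | (simp; omega)
  · first | omega | (simp; omega)
  · first | omega | (simp; omega)

def analizador_lexico (cadena : String) : List (String × String) :=
  anaGoA cadena.toList []

-- ===== PORT B =====
def headIsDigit : List Char → Bool
  | d :: _ => PySem.Chars.isdigit d
  | [] => false

def anaGoB (cs : List Char) : List (String × String) :=
  match cs with
  | [] => []
  | c :: rest =>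
    if PySem.Chars.isspace c then anaGoB rest
    else if PySem.Chars.isalpha c then
      ("id", String.ofList (c :: rest.takeWhile PySem.Chars.isalnum))
        :: anaGoB (rest.dropWhile PySem.Chars.isalnum)
    else if PySem.Chars.isdigit c ∨ ((c = '+' ∨ c = '-') ∧ headIsDigit rest) then
      ("num", String.ofList (c :: rest.takeWhile PySem.Chars.isdigit))
        :: anaGoB (rest.dropWhile PySem.Chars.isdigit)
    else if c ∈ ['+', '-', '*', '/', '=', '(', ')'] then
      (String.ofList [c], String.ofList [c]) :: anaGoB rest
    else []
  termination_by cs.length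
  decreasing_by
  · simp
  · have := List.length_dropWhile_le PySem.Chars.isalnum rest
    simp at this ⊢; omega
  · have := List.length_dropWhile_le PySem.Chars.isdigit rest
    simp at this ⊢; omega
  · simp

def analizador_lexico_alt (cadena : String) : List (String × String) :=
  anaGoB cadena.toList

-- ===== PRECONDITION & SPEC =====
-- Pre_ excludes exactly the strings containing a character that is neither whitespace,
-- nor a letter, nor a digit, nor an operator/parenthesis character: on those A raises ValueError.
def Pre_analizador_lexico (cadena : String) : Prop :=
  cadena.toList.all (fun c =>
    PySem.Chars.isspace c || PySem.Chars.isalpha c || PySem.Chars.isdigit c ||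
    ['+', '-', '*', '/', '=', '(', ')'].contains c) = true

instance (cadena : String) : Decidable (Pre_analizador_lexico cadena) := by
  unfold Pre_analizador_lexico; infer_instance

def pvWitness_analizador_lexico : String := "x1 = (a + 23) * -4"

def Spec_analizador_lexico (cadena : String) (out : List (String × String)) : Prop := out = analizador_lexico_alt cadena
instance (cadena : String) (out : List (String × String)) : Decidable (Spec_analizador_lexico cadena out) := by unfold Spec_analizador_lexico; infer_instance

-- ===== CLAIM (what is proved, stated in full; the proofs are below) =====
def Claim_equal_analizador_lexico : Prop := ∀ (cadena : String), Dom_analizador_lexico cadena → Pre_analizador_lexico cadena → Spec_analizador_lexico cadena (analizador_lexico cadena)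

-- ===== LEMMAS AND PROOFS =====

theorem take_len_takeWhile (p : Char → Bool) : ∀ l : List Char,
    l.take (l.takeWhile p).length = l.takeWhile p
  | [] => rfl
  | c :: l => by
    by_cases h : p c
    · simp [List.takeWhile_cons, h, take_len_takeWhile p l]
    · simp [List.takeWhile_cons, h]

theorem drop_len_takeWhile (p : Char → Bool) : ∀ l : List Char,
    l.drop (l.takeWhile p).length = l.dropWhile p
  | [] => rfl
  | c :: l => by
    by_cases h : p c
    · simp [List.takeWhile_cons, List.dropWhile_cons, h, drop_len_takeWhile p l]
    · simp [List.takeWhile_cons, List.dropWhile_cons, h]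

theorem afdIdGo_one : ∀ (l : List Char) (i : Nat),
    afdIdGo 1 i l = (1, i + (l.takeWhile PySem.Chars.isalnum).length)
  | [], i => by simp [afdIdGo]
  | c :: l, i => by
    by_cases h : PySem.Chars.isalnum c
    · simp only [afdIdGo, List.takeWhile_cons, h, if_pos,
        afdIdGo_one l (i + 1)]
      first | omega | (simp; omega)
    · simp [afdIdGo, List.takeWhile_cons, h]

theorem afd_id_cons (c : Char) (rest : List Char) :
    afd_id (c :: rest) =
      if PySem.Chars.isalpha c then (rest.takeWhile PySem.Chars.isalnum).length + 1 else 0 := by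
  by_cases h : PySem.Chars.isalpha c
  · simp only [afd_id, afdIdGo, h, if_true, afdIdGo_one rest 1]
    first | omega | (simp; omega)
  · simp [afd_id, afdIdGo, h]

theorem afdNumGo_two : ∀ (l : List Char) (i : Nat),
    afdNumGo 2 i l = (2, i + (l.takeWhile PySem.Chars.isdigit).length)
  | [], i => by simp [afdNumGo]
  | c :: l, i => by
    by_cases h : PySem.Chars.isdigit c
    · simp only [afdNumGo, List.takeWhile_cons, h, reduceIte, afdNumGo_two l (i + 1)]
      first | omega | (simp; omega)
    · simp [afdNumGo, List.takeWhile_cons, h]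

theorem afdNumGo_one (l : List Char) (i : Nat) :
    afdNumGo 1 i l =
      if headIsDigit l then (2, i + (l.takeWhile PySem.Chars.isdigit).length) else (1, i) := by
  cases l with
  | nil => simp [afdNumGo, headIsDigit]
  | cons d l =>
    by_cases h : PySem.Chars.isdigit d
    · simp only [afdNumGo, headIsDigit, List.takeWhile_cons, h, reduceIte, afdNumGo_two l (i + 1)]
      first | omega | (simp; omega)
    · simp [afdNumGo, headIsDigit, List.takeWhile_cons, h]

theorem afd_num_cons (c : Char) (rest : List Char) :
    afd_num (c :: rest) =
      if c = '+' ∨ c = '-' then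
        (if headIsDigit rest then (rest.takeWhile PySem.Chars.isdigit).length + 1 else 0)
      else if PySem.Chars.isdigit c then (rest.takeWhile PySem.Chars.isdigit).length + 1
      else 0 := by
  by_cases hs : c = '+' ∨ c = '-'
  · by_cases hh : headIsDigit rest
    · simp only [afd_num, afdNumGo, hs, hh, if_true, afdNumGo_one rest 1]
      first | omega | (simp; omega)
    · simp [afd_num, afdNumGo, hs, afdNumGo_one rest 1, hh]
  · by_cases hd : PySem.Chars.isdigit c
    · simp only [afd_num, afdNumGo, hs, hd, if_false, if_true, afdNumGo_two rest 1]
      first | omega | (simp; omega)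
    · simp [afd_num, afdNumGo, hs, hd]

theorem anaGo_eq (n : Nat) : ∀ (cs : List Char) (toks : List (String × String)),
    cs.length ≤ n →
    (∀ c ∈ cs,
      PySem.Chars.isspace c = true ∨ PySem.Chars.isalpha c = true ∨
      PySem.Chars.isdigit c = true ∨ c ∈ ['+', '-', '*', '/', '=', '(', ')']) →
    anaGoA cs toks = toks ++ anaGoB cs := by
  induction n with
  | zero =>
    intro cs toks hlen _
    have : cs = [] := List.length_eq_zero_iff.mp (Nat.le_zero.mp hlen)
    subst this; simp [anaGoA, anaGoB]
  | succ n ih =>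
    intro cs toks hlen hval
    cases cs with
    | nil => simp [anaGoA, anaGoB]
    | cons c rest =>
      have hc := hval c (List.mem_cons_self ..)
      have hrest : ∀ x ∈ rest, PySem.Chars.isspace x = true ∨ PySem.Chars.isalpha x = true ∨
          PySem.Chars.isdigit x = true ∨ x ∈ ['+', '-', '*', '/', '=', '(', ')'] :=
        fun x hx => hval x (List.mem_cons_of_mem _ hx)
      have hlenr : rest.length ≤ n := by simp at hlen; omega
      by_cases hsp : PySem.Chars.isspace c = true
      · rw [show anaGoA (c :: rest) toks = anaGoA rest toks by
            simp [anaGoA, hsp]]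
        rw [ih rest toks hlenr hrest]
        simp [anaGoB, hsp]
      · by_cases ha : PySem.Chars.isalpha c = true
        · -- identifier
          have hid := afd_id_cons c rest
          rw [if_pos ha] at hid
          have hdw : ∀ x ∈ rest.dropWhile PySem.Chars.isalnum, PySem.Chars.isspace x = true ∨
              PySem.Chars.isalpha x = true ∨ PySem.Chars.isdigit x = true ∨
              x ∈ ['+', '-', '*', '/', '=', '(', ')'] :=
            fun x hx => hrest x ((List.dropWhile_sublist _).subset hx)
          have hlend : (rest.dropWhile PySem.Chars.isalnum).length ≤ n :=
            le_trans (List.length_dropWhile_le _ _) hlenr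
          rw [show anaGoA (c :: rest) toks =
              anaGoA (rest.dropWhile PySem.Chars.isalnum)
                (toks ++ [("id", String.ofList (c :: rest.takeWhile PySem.Chars.isalnum))]) by
            simp [anaGoA, hsp, hid, List.take_succ_cons, List.drop_succ_cons,
              take_len_takeWhile, drop_len_takeWhile]]
          rw [ih _ _ hlend hdw]
          simp [anaGoB, hsp, ha]
        · by_cases hd : PySem.Chars.isdigit c = true
          · -- number starting with a digit
            have hns : ¬(c = '+' ∨ c = '-') := by
              rintro (rfl | rfl) <;> exact absurd hd (by decide)
            have hnum := afd_num_cons c rest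
            rw [if_neg hns, if_pos hd] at hnum
            have hdw : ∀ x ∈ rest.dropWhile PySem.Chars.isdigit, PySem.Chars.isspace x = true ∨
                PySem.Chars.isalpha x = true ∨ PySem.Chars.isdigit x = true ∨
                x ∈ ['+', '-', '*', '/', '=', '(', ')'] :=
              fun x hx => hrest x ((List.dropWhile_sublist _).subset hx)
            have hlend : (rest.dropWhile PySem.Chars.isdigit).length ≤ n :=
              le_trans (List.length_dropWhile_le _ _) hlenr
            rw [show anaGoA (c :: rest) toks =
                anaGoA (rest.dropWhile PySem.Chars.isdigit)
                  (toks ++ [("num", String.ofList (c :: rest.takeWhile PySem.Chars.isdigit))]) by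
              simp [anaGoA, hsp, afd_id_cons, ha, hnum, List.take_succ_cons, List.drop_succ_cons,
                take_len_takeWhile, drop_len_takeWhile]]
            rw [ih _ _ hlend hdw]
            simp [anaGoB, hsp, ha, hd]
          · by_cases hs : c = '+' ∨ c = '-'
            · by_cases hh : headIsDigit rest = true
              · -- signed number
                have hnum := afd_num_cons c rest
                rw [if_pos hs, if_pos hh] at hnum
                have hdw : ∀ x ∈ rest.dropWhile PySem.Chars.isdigit, PySem.Chars.isspace x = true ∨
                    PySem.Chars.isalpha x = true ∨ PySem.Chars.isdigit x = true ∨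
                    x ∈ ['+', '-', '*', '/', '=', '(', ')'] :=
                  fun x hx => hrest x ((List.dropWhile_sublist _).subset hx)
                have hlend : (rest.dropWhile PySem.Chars.isdigit).length ≤ n :=
                  le_trans (List.length_dropWhile_le _ _) hlenr
                rw [show anaGoA (c :: rest) toks =
                    anaGoA (rest.dropWhile PySem.Chars.isdigit)
                      (toks ++ [("num", String.ofList (c :: rest.takeWhile PySem.Chars.isdigit))]) by
                  simp [anaGoA, hsp, afd_id_cons, ha, hnum, List.take_succ_cons,
                    List.drop_succ_cons, take_len_takeWhile, drop_len_takeWhile]]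
                rw [ih _ _ hlend hdw]
                simp [anaGoB, hsp, ha, hd, hs, hh]
              · -- bare sign: operator token
                have hnum := afd_num_cons c rest
                rw [if_pos hs, if_neg hh] at hnum
                have hmem : c ∈ ['+', '-', '*', '/', '=', '(', ')'] := by
                  rcases hs with rfl | rfl <;> decide
                rw [show anaGoA (c :: rest) toks =
                    anaGoA rest (toks ++ [(String.ofList [c], String.ofList [c])]) by
                  simp [anaGoA, hsp, afd_id_cons, ha, hnum, afd_op_par, hmem]]
                rw [ih _ _ hlenr hrest]
                simp [anaGoB, hsp, ha, hd, hs, hh, hmem]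
            · -- other operator / parenthesis
              have hmem : c ∈ ['+', '-', '*', '/', '=', '(', ')'] := by
                rcases hc with h | h | h | h
                · exact absurd h hsp
                · exact absurd h ha
                · exact absurd h hd
                · exact h
              have hnum := afd_num_cons c rest
              rw [if_neg hs, if_neg hd] at hnum
              rw [show anaGoA (c :: rest) toks =
                  anaGoA rest (toks ++ [(String.ofList [c], String.ofList [c])]) by
                simp [anaGoA, hsp, afd_id_cons, ha, hnum, afd_op_par, hmem]]
              rw [ih _ _ hlenr hrest]
              simp [anaGoB, hsp, ha, hd, hs, hmem]

-- ===== VERDICT (by name: the statement is the Claim_ definition above) =====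
theorem analizador_lexico_spec : Claim_equal_analizador_lexico := by
  intro cadena _ hpre
  have hval : ∀ c ∈ cadena.toList,
      PySem.Chars.isspace c = true ∨ PySem.Chars.isalpha c = true ∨
      PySem.Chars.isdigit c = true ∨ c ∈ ['+', '-', '*', '/', '=', '(', ')'] := by
    intro c hc
    have h := List.all_eq_true.mp hpre c hc
    simp only [Bool.or_eq_true, List.contains_eq_mem, decide_eq_true_eq] at h
    tauto
  unfold Spec_analizador_lexico analizador_lexico analizador_lexico_alt
  simpa using anaGo_eq cadena.toList.length cadena.toList [] le_rfl hval
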